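-- pv_equiv track=rewrite | github.com/RockerBot/FourierSeiriesVisualizer | clr_ferraree.py | find_strt
-- ===== SOURCE A (Python) =====
-- def find_strt(mtrx):
--     h, w = len(mtrx), len(mtrx[0])
--     rndx = cndx = 0
--     while cndx < h and rndx < w:
--         for i in range(rndx, w):
--             if mtrx[cndx][i]: return i, cndx
--         cndx += 1
--         for i in range(cndx, h):
--             if mtrx[i][w - 1]: return w - 1, i
--         w -= 1
--         if cndx < h:
--             for i in range(w - 1, rndx - 1, -1):
--                 if mtrx[h - 1][i]: return i, h - 1
--             h -= 1
--         if rndx < w: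
--             for i in range(h - 1, cndx - 1, -1):
--                 if mtrx[i][rndx]: return rndx, i
--             rndx += 1
--     raise ValueError('no pixels')
-- ===== SOURCE B (Python) =====
-- def find_strt(mtrx):
--     w = len(mtrx[0])
--     coords = [[(c, r) for c in range(w)] for r in range(len(mtrx))]
--     while coords:
--         for c, r in coords[0]:
--             if mtrx[r][c]:
--                 return c, r
--         coords = [[row[c] for row in coords[1:]] for c in range(len(coords[0]) - 1, -1, -1)]
--     raise ValueError('no pixels')
-- ===== Notes on version B (the rewrite author's own statement) =====
-- stated objective: alternative
-- what changed: A's four boundary-shrinking scan loops with h/w/rndx/cndx bookkeeping are replaced by the classic peel-and-rotate spiral: build a matrix of (col,row) coordinate pairs, repeatedly scan its first row for a nonzero cell and rotate the remainder counterclockwise.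
-- outside the precondition, e.g. on find_strt([[0, 0], [1, 3], [0]]): A returns (1, 1), B returns (1, 1)
import Mathlib
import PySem

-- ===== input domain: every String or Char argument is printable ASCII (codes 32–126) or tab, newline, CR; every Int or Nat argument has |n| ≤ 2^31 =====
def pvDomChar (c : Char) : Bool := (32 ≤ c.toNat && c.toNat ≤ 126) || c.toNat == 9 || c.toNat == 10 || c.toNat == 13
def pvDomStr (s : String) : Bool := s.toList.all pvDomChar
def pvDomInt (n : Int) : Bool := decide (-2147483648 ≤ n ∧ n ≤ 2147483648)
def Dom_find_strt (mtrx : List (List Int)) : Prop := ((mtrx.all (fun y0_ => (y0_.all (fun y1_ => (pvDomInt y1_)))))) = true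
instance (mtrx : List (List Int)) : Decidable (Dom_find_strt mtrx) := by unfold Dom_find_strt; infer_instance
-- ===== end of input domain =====

-- B replaces A's four boundary-shrinking scan loops by the classic peel-and-rotate spiral
-- (scan the first row of a coordinate matrix, then rotate the rest counterclockwise); objective: alternative.

-- shared indexing helper: mtrx[r][c] (in-range on every access both programs make; default value otherwise)
def getRow (m : List (List Int)) (r : Int) : List Int := PySem.List.pyGetD m r []
def getCell (m : List (List Int)) (r c : Int) : Int := PySem.List.pyGetD (getRow m r) c 0

-- termination helper for the port of A's while loop (cited by name to keep the definition small)
theorem find_strt_dec {h w rndx cndx h' rndx' : Int} (hg : cndx < h ∧ rndx < w)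
    (hh : h' ≤ h) (hr : rndx ≤ rndx') :
    (h' - (cndx + 1) + (w - 1 - rndx')).toNat < (h - cndx + (w - rndx)).toNat := by omega

-- ===== PORT A =====
def find_strt_go (m : List (List Int)) (h w rndx cndx : Int) : Int × Int :=
  if cndx < h ∧ rndx < w then
    match (PySem.List.pyRange rndx w 1).find? (fun i => getCell m cndx i != 0) with
    | some i => (i, cndx)
    | none =>
      match (PySem.List.pyRange (cndx + 1) h 1).find? (fun i => getCell m i (w - 1) != 0) with
      | some i => (w - 1, i)
      | none =>
        if cndx + 1 < h then
          match (PySem.List.pyRange (w - 2) (rndx - 1) (-1)).find? (fun i => getCell m (h - 1) i != 0) with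
          | some i => (i, h - 1)
          | none =>
            if rndx < w - 1 then
              match (PySem.List.pyRange (h - 2) cndx (-1)).find? (fun i => getCell m i rndx != 0) with
              | some i => (rndx, i)
              | none => find_strt_go m (h - 1) (w - 1) (rndx + 1) (cndx + 1)
            else find_strt_go m (h - 1) (w - 1) rndx (cndx + 1)
        else
          if rndx < w - 1 then
            match (PySem.List.pyRange (h - 1) cndx (-1)).find? (fun i => getCell m i rndx != 0) with
            | some i => (rndx, i)
            | none => find_strt_go m h (w - 1) (rndx + 1) (cndx + 1)
          else find_strt_go m h (w - 1) rndx (cndx + 1)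
  else (0, 0)  -- the 'raise ValueError' branch, excluded by Pre_
termination_by (h - cndx + (w - rndx)).toNat
decreasing_by all_goals exact find_strt_dec ‹_› (by omega) (by omega)

def find_strt (mtrx : List (List Int)) : Int × Int :=
  find_strt_go mtrx mtrx.length ((getRow mtrx 0).length : Int) 0 0

-- ===== PORT B =====
-- cells = [[row[c] for row in cells[1:]] for c in range(len(cells[0]) - 1, -1, -1)]
def rotCCW (cells : List (List (Int × Int))) : List (List (Int × Int)) :=
  (PySem.List.pyRange (((PySem.List.pyGetD cells 0 []).length : Int) - 1) (-1) (-1)).map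
    (fun c => (PySem.List.slice cells (some 1) none).map (fun row => PySem.List.pyGetD row c (0, 0)))

theorem rotCCW_measure (row0 : List (Int × Int)) (rest : List (List (Int × Int))) :
    (rotCCW (row0 :: rest)).length + (rotCCW (row0 :: rest)).headI.length <
      (row0 :: rest).length + (row0 :: rest).headI.length := by
  unfold rotCCW
  rw [PySem.List.pyGetD_zero_cons, PySem.List.slice_from_one, PySem.List.pyRange_neg_one]
  rcases row0 with _ | ⟨p, ps⟩
  · simp [show (default : List (ℤ × ℤ)) = [] from rfl]
  · have hc : ((((p :: ps).length : Int) - 1) - (-1)).toNat = Nat.succ ps.length := by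
      simp only [List.length_cons]; omega
    rw [hc, List.range_succ_eq_map]
    simp [List.headI]
    omega

def find_strt_alt_go (m : List (List Int)) (coords : List (List (Int × Int))) : Int × Int :=
  match coords with
  | [] => (0, 0)  -- the 'raise ValueError' branch, excluded by Pre_
  | row0 :: rest =>
    match row0.find? (fun p => getCell m p.2 p.1 != 0) with
    | some p => p
    | none => find_strt_alt_go m (rotCCW (row0 :: rest))
termination_by coords.length + coords.headI.length
decreasing_by exact rotCCW_measure row0 rest

def find_strt_alt (mtrx : List (List Int)) : Int × Int :=
  find_strt_alt_go mtrx
    ((PySem.List.pyRange 0 mtrx.length 1).map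
      (fun r => (PySem.List.pyRange 0 ((getRow mtrx 0).length : Int) 1).map (fun c => (c, r))))

-- ===== PRECONDITION & SPEC =====
-- Pre_ excludes: the empty matrix and (beyond the first-row case) ragged matrices with a row shorter
-- than the first, on which A can raise IndexError mid-scan, and matrices with no nonzero cell in the
-- first len(mtrx[0]) columns, on which A raises ValueError; it admits any matrix whose first row
-- contains a nonzero (A returns from row 0 there) and any matrix with no row shorter than the first
-- that has a nonzero in the scanned region.
def Pre_find_strt (mtrx : List (List Int)) : Prop :=
  mtrx ≠ [] ∧
    ((mtrx.headI.any (fun x => x != 0)) = true ∨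
      ((mtrx.all (fun row => mtrx.headI.length ≤ row.length)) = true ∧
        (mtrx.any (fun row => (row.take mtrx.headI.length).any (fun x => x != 0))) = true))
instance (mtrx : List (List Int)) : Decidable (Pre_find_strt mtrx) := by unfold Pre_find_strt; infer_instance
def pvWitness_find_strt : List (List Int) := [[0, 0], [2, 1]]

def Spec_find_strt (mtrx : List (List Int)) (out : Int × Int) : Prop := out = find_strt_alt mtrx
instance (mtrx : List (List Int)) (out : Int × Int) : Decidable (Spec_find_strt mtrx out) := by unfold Spec_find_strt; infer_instance

-- ===== CLAIM (what is proved, stated in full; the proofs are below) =====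
def Claim_equal_find_strt : Prop := ∀ (mtrx : List (List Int)), Dom_find_strt mtrx → Pre_find_strt mtrx → Spec_find_strt mtrx (find_strt mtrx)

-- ===== LEMMAS AND PROOFS =====

-- first hit along a list of (col, row) coordinates
def hitP (m : List (List Int)) (p : Int × Int) : Bool := getCell m p.2 p.1 != 0
def res (m : List (List Int)) (l : List (Int × Int)) : Int × Int := (l.find? (hitP m)).getD (0, 0)

-- the (col,row) coordinates A's loop visits, in order
def Acoords (h w rndx cndx : Int) : List (Int × Int) :=
  if cndx < h ∧ rndx < w then
    (PySem.List.pyRange rndx w 1).map (fun i => (i, cndx)) ++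
    (PySem.List.pyRange (cndx + 1) h 1).map (fun i => (w - 1, i)) ++
    (if cndx + 1 < h then (PySem.List.pyRange (w - 2) (rndx - 1) (-1)).map (fun i => (i, h - 1)) else []) ++
    (if rndx < w - 1 then
        (PySem.List.pyRange ((if cndx + 1 < h then h - 1 else h) - 1) cndx (-1)).map (fun i => (rndx, i))
      else []) ++
    Acoords (if cndx + 1 < h then h - 1 else h) (w - 1) (if rndx < w - 1 then rndx + 1 else rndx) (cndx + 1)
  else []
termination_by (h - cndx + (w - rndx)).toNat
decreasing_by all_goals exact find_strt_dec ‹_› (by split_ifs <;> omega) (by split_ifs <;> omega)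

-- the (col,row) coordinates B visits, abstractly: coordinates (r,c) of the h×w peel order
def Pc (h w : Int) : List (Int × Int) :=
  if 0 < h then
    (PySem.List.pyRange 0 w 1).map (fun c => ((0 : Int), c)) ++
    (Pc w (h - 1)).map (fun p => (p.2 + 1, w - 1 - p.1))
  else []
termination_by (h.toNat + w.toNat)
decreasing_by omega

def annot {α : Type} (h w : Int) (f : Int → Int → α) : List (List α) :=
  (PySem.List.pyRange 0 h 1).map (fun r => (PySem.List.pyRange 0 w 1).map (f r))

def peelFlat (coords : List (List (Int × Int))) : List (Int × Int) :=
  match coords with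
  | [] => []
  | row0 :: rest => row0 ++ peelFlat (rotCCW (row0 :: rest))
termination_by coords.length + coords.headI.length
decreasing_by exact rotCCW_measure row0 rest

theorem A_res (m : List (List Int)) (h w rndx cndx : Int) :
    find_strt_go m h w rndx cndx = res m (Acoords h w rndx cndx) := by
  induction h, w, rndx, cndx using find_strt_go.induct m <;>
    (rw [find_strt_go, Acoords]
     unfold res
     try simp_all only [List.find?_append, List.find?_map, Function.comp_def, hitP,
       Option.map_some, Option.map_none, Option.getD_some, Option.getD_none, List.find?_nil,
       Option.or_some, Option.none_or, Option.some_or, Option.or_none,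
       ite_true, ite_false, and_true, true_and, and_self, not_true, not_false_iff]
     try simp only [show ∀ (a : Int), a - 1 - 1 = a - 2 from fun a => by ring]
     try simp_all only [List.find?_append, List.find?_map, Function.comp_def, hitP,
       Option.map_some, Option.map_none, Option.getD_some, Option.getD_none, List.find?_nil,
       Option.or_some, Option.none_or, Option.some_or, Option.or_none,
       ite_true, ite_false, and_true, true_and, and_self, not_true, not_false_iff]
     try rfl)

theorem B_res (m : List (List Int)) (coords : List (List (Int × Int))) :
    find_strt_alt_go m coords = res m (peelFlat coords) := by
  induction coords using find_strt_alt_go.induct m with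
  | case1 => simp [find_strt_alt_go, peelFlat, res]
  | case2 row0 rest p hp =>
    rw [find_strt_alt_go, peelFlat]
    unfold res
    rw [List.find?_append]
    rw [show hitP m = (fun p => getCell m p.2 p.1 != 0) from rfl, hp]
    simp
  | case3 row0 rest hp ih =>
    rw [find_strt_alt_go, peelFlat]
    unfold res
    rw [List.find?_append]
    rw [show hitP m = (fun p => getCell m p.2 p.1 != 0) from rfl, hp]
    simpa [res, hitP] using ih

theorem rot_annot {f : Int → Int → Int × Int} {h w : Int} (hh : 1 ≤ h) (hw : 0 ≤ w) :
    rotCCW (annot h w f) = annot w (h - 1) (fun r c => f (c + 1) (w - 1 - r)) := by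
  unfold annot rotCCW
  rw [PySem.List.pyRange_one_cons (by omega : (0:Int) < h)]
  simp only [List.map_cons]
  rw [PySem.List.pyGetD_zero_cons, PySem.List.slice_from_one]
  simp only [List.tail_cons, List.length_map, PySem.List.length_pyRange_one, List.map_map]
  have hcast : (((w - 0).toNat : Int)) - 1 = w - 1 := by omega
  rw [hcast]
  rw [PySem.List.pyRange_neg_one (w - 1) (-1), PySem.List.pyRange_one 0 w]
  have hlen : (w - 1 - -1).toNat = (w - 0).toNat := by omega
  rw [hlen]
  simp only [List.map_map]
  apply List.map_congr_left
  intro k hk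
  have hk' : k < (w - 0).toNat := List.mem_range.mp hk
  simp only [Function.comp]
  rw [show (0:Int) + 1 = 1 from by norm_num]
  rw [PySem.List.pyRange_one 1 h, PySem.List.pyRange_one 0 (h - 1)]
  rw [show h - 1 - 0 = h - 1 from by ring]
  simp only [List.map_map]
  apply List.map_congr_left
  intro j hj
  simp only [Function.comp]
  rw [PySem.List.pyGetD_eq_getElem _ _ (by omega) (by simp; omega)]
  simp only [List.getElem_map, List.getElem_range, Function.comp]
  rw [show (0:Int) + (((w - 1 - (k : Int)).toNat : Int)) = w - 1 - (0 + (k : Int)) from by omega,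
      show (1 : Int) + (j : Int) = 0 + (j : Int) + 1 from by ring]

theorem peel_annot (n : Nat) (h w : Int) (f : Int → Int → Int × Int)
    (hh : 0 ≤ h) (hw : 0 ≤ w) (hn : h.toNat + w.toNat ≤ n) :
    peelFlat (annot h w f) = (Pc h w).map (fun p => f p.1 p.2) := by
  induction n generalizing h w f with
  | zero =>
    have hz : h = 0 := by omega
    subst hz
    rw [Pc]
    simp [annot, PySem.List.pyRange_one_eq_nil (le_refl (0:Int)), peelFlat]
  | succ n ih =>
    by_cases h0 : 0 < h
    · have hcons : annot h w f =
          ((PySem.List.pyRange 0 w 1).map (f 0)) ::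
            ((PySem.List.pyRange 1 h 1).map (fun r => (PySem.List.pyRange 0 w 1).map (f r))) := by
        unfold annot
        rw [PySem.List.pyRange_one_cons h0]
        simp
      rw [hcons, peelFlat, ← hcons, rot_annot (by omega) hw]
      rw [ih w (h - 1) _ hw (by omega) (by omega)]
      conv_rhs => rw [Pc, if_pos h0]
      simp only [List.map_append, List.map_map]
      congr 1
    · have hz : h = 0 := by omega
      subst hz
      rw [Pc]
      simp [annot, PySem.List.pyRange_one_eq_nil (le_refl (0:Int)), peelFlat]

theorem map_range_eq {α : Type} {n1 n2 : Nat} (f1 f2 : Nat → α) (hn : n1 = n2)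
    (he : ∀ k : Nat, k < n1 → f1 k = f2 k) :
    (List.range n1).map f1 = (List.range n2).map f2 := by
  subst hn
  exact List.map_congr_left (fun k hk => he k (List.mem_range.mp hk))

theorem Pc_pos (h w : Int) (hh : 0 < h) :
    Pc h w = (PySem.List.pyRange 0 w 1).map (fun c => ((0 : Int), c)) ++
      (Pc w (h - 1)).map (fun p => (p.2 + 1, w - 1 - p.1)) := by
  rw [Pc, if_pos hh]

theorem Pc_nil_left (h w : Int) (hh : h ≤ 0) : Pc h w = [] := by
  rw [Pc, if_neg (by omega)]

theorem Pc_nil_right (h w : Int) (hw : w ≤ 0) : Pc h w = [] := by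
  by_cases h0 : 0 < h
  · rw [Pc_pos _ _ h0, PySem.List.pyRange_one_eq_nil (by omega), Pc, if_neg (by omega)]
    simp
  · exact Pc_nil_left _ _ (by omega)

theorem Acoords_Pc (h w rndx cndx : Int) :
    Acoords h w rndx cndx = (Pc (h - cndx) (w - rndx)).map (fun p => (p.2 + rndx, p.1 + cndx)) := by
  suffices H : ∀ (N : Nat) (h w rndx cndx : Int), (h - cndx + (w - rndx)).toNat ≤ N →
      Acoords h w rndx cndx = (Pc (h - cndx) (w - rndx)).map (fun p => (p.2 + rndx, p.1 + cndx)) from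
    H ((h - cndx + (w - rndx)).toNat) h w rndx cndx le_rfl
  intro N
  induction N with
  | zero =>
    intro h w rndx cndx hN
    rw [Acoords, if_neg (by rintro ⟨h1, h2⟩; omega)]
    rcases (by omega : h - cndx ≤ 0 ∨ w - rndx ≤ 0) with hc | hc
    · rw [Pc_nil_left _ _ hc]
      rfl
    · rw [Pc_nil_right _ _ hc]
      rfl
  | succ N ih =>
    intro h w rndx cndx hN
    by_cases hg : cndx < h ∧ rndx < w
    · by_cases hb : cndx + 1 < h
      · by_cases hl : rndx < w - 1
        · -- general ring: both remaining dimensions at least 2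
          rw [Acoords, if_pos hg]
          simp only [if_pos hb, if_pos hl,
            show ∀ (a : Int), a - 1 - 1 = a - 2 from fun a => by ring]
          rw [ih (h - 1) (w - 1) (rndx + 1) (cndx + 1) (by omega)]
          conv_rhs => rw [Pc_pos _ _ (by omega), Pc_pos _ _ (by omega),
            Pc_pos _ _ (by omega), Pc_pos _ _ (by omega)]
          simp only [List.map_append, List.map_map, List.append_assoc]
          congr 1
          · -- top row
            rw [PySem.List.pyRange_one, PySem.List.pyRange_one]
            simp only [List.map_map]
            apply map_range_eq _ _ (by omega)
            intro k hk
            simp only [Function.comp_def, Prod.mk.injEq]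
            omega
          congr 1
          · -- right column
            rw [PySem.List.pyRange_one, PySem.List.pyRange_one]
            simp only [List.map_map]
            apply map_range_eq _ _ (by omega)
            intro k hk
            simp only [Function.comp_def, Prod.mk.injEq]
            omega
          congr 1
          · -- bottom row, reversed
            rw [PySem.List.pyRange_one, PySem.List.pyRange_neg_one]
            simp only [List.map_map]
            apply map_range_eq _ _ (by omega)
            intro k hk
            simp only [Function.comp_def, Prod.mk.injEq]
            omega
          congr 1
          · -- left column, reversed
            rw [PySem.List.pyRange_one, PySem.List.pyRange_neg_one]
            simp only [List.map_map]
            apply map_range_eq _ _ (by omega)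
            intro k hk
            simp only [Function.comp_def, Prod.mk.injEq]
            omega
          · -- inner rectangle
            rw [show h - 1 - (cndx + 1) = h - cndx - 1 - 1 from by ring,
              show w - 1 - (rndx + 1) = w - rndx - 1 - 1 from by ring]
            apply List.map_congr_left
            intro p hp
            simp only [Function.comp_def, Prod.mk.injEq]
            omega
        · -- single remaining column
          rw [Acoords, if_pos hg]
          simp only [if_pos hb, if_neg hl]
          rw [PySem.List.pyRange_neg_one_eq_nil (by omega : w - 2 ≤ rndx - 1)]
          rw [ih (h - 1) (w - 1) rndx (cndx + 1) (by omega)]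
          rw [Pc_nil_right _ _ (by omega)]
          conv_rhs => rw [Pc_pos _ _ (by omega), Pc_pos _ _ (by omega),
            Pc_nil_right _ _ (by omega)]
          simp only [List.map_append, List.map_map, List.map_nil, List.append_assoc,
            List.append_nil, List.nil_append]
          congr 1
          · -- top cell
            rw [PySem.List.pyRange_one, PySem.List.pyRange_one]
            simp only [List.map_map]
            apply map_range_eq _ _ (by omega)
            intro k hk
            simp only [Function.comp_def, Prod.mk.injEq]
            omega
          · -- right column
            rw [PySem.List.pyRange_one, PySem.List.pyRange_one]
            simp only [List.map_map]
            apply map_range_eq _ _ (by omega)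
            intro k hk
            simp only [Function.comp_def, Prod.mk.injEq]
            omega
      · -- single remaining row
        rw [Acoords, if_pos hg]
        simp only [if_neg hb]
        rw [PySem.List.pyRange_one_eq_nil (by omega : h ≤ cndx + 1)]
        rw [PySem.List.pyRange_neg_one_eq_nil (by omega : h - 1 ≤ cndx)]
        have hrec : ∀ r : Int, Acoords h (w - 1) r (cndx + 1) = [] := by
          intro r
          rw [Acoords, if_neg (by rintro ⟨h1, h2⟩; omega)]
        conv_rhs => rw [Pc_pos _ _ (by omega), Pc_nil_right _ _ (by omega)]
        split_ifs with hl <;>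
          (rw [hrec]
           simp only [List.map_append, List.map_map, List.map_nil, List.append_assoc,
             List.append_nil, List.nil_append, List.map_nil]
           rw [PySem.List.pyRange_one, PySem.List.pyRange_one]
           simp only [List.map_map]
           apply map_range_eq _ _ (by omega)
           intro k hk
           simp only [Function.comp_def, Prod.mk.injEq]
           omega)
    · rw [Acoords, if_neg hg]
      rcases (by omega : h - cndx ≤ 0 ∨ w - rndx ≤ 0) with hc | hc
      · rw [Pc_nil_left _ _ hc]
        rfl
      · rw [Pc_nil_right _ _ hc]
        rfl

-- ===== VERDICT (by name: the statement is the Claim_ definition above) =====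
theorem find_strt_spec : Claim_equal_find_strt := by
  intro m _ _
  unfold Spec_find_strt find_strt find_strt_alt
  rw [A_res, B_res]
  have hcoords :
      (PySem.List.pyRange 0 m.length 1).map
        (fun r => (PySem.List.pyRange 0 ((getRow m 0).length : Int) 1).map (fun c => ((c : Int), r))) =
      annot (m.length : Int) ((getRow m 0).length : Int) (fun r c => (c, r)) := rfl
  rw [hcoords, peel_annot (((m.length : Int)).toNat + (((getRow m 0).length : Int)).toNat) _ _ _
        (by positivity) (by positivity) le_rfl]
  rw [Acoords_Pc]
  simp
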